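-- pv_equiv track=rewrite | github.com/ibmsoe/Autoport | utils.py | collapse_semicolons
-- ===== SOURCE A (Python) =====
-- def collapse_semicolons(line):
--     add = False
--     l = ''
--
--     for c in line:
--         if c == ';' and add:
--             l = l + c
--             add = False
--         if not c == ';':
--             add = True
--             l = l + c
--
--     return l
-- ===== SOURCE B (Python) =====
-- def collapse_semicolons(line):
--     out = []
--     i = 0
--     n = len(line)
--     while i < n:
--         c = line[i]
--         out.append(c)
--         if c == ';':
--             while i < n and line[i] == ';':
--                 i += 1
--         else:
--             i += 1
--     s = ''.join(out)
--     return s[1:] if s.startswith(';') else s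
-- ===== Notes on version B (the rewrite author's own statement) =====
-- stated objective: simpler
-- what changed: Replaces A's boolean-flag state machine over every character with a run-skipping copy loop (append each char, then skip the whole semicolon run after one) followed by stripping the single possible leading semicolon.
import Mathlib
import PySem

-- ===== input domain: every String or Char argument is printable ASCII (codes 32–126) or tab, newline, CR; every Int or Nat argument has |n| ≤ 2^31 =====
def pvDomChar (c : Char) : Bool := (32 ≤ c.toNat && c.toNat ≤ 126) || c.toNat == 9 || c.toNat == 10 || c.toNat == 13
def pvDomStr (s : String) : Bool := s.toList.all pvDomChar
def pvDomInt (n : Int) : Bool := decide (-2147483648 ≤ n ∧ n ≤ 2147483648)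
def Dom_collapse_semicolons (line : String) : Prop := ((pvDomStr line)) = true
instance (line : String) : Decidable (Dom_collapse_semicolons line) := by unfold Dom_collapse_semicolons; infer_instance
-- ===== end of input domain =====

-- B replaces A's char-by-char boolean state machine by a run-skipping copy loop plus a single
-- leading-';' strip (objective: simpler); return values proved equal on all inputs.

-- ===== PORT A =====
-- A's loop body: state = (add, l); the two sequential ifs, in order
def pvStepA (st : Bool × String) (c : Char) : Bool × String :=
  let st := if c = ';' ∧ st.1 then (false, st.2.push c) else st
  if ¬ (c = ';') then (true, st.2.push c) else st

def collapse_semicolons (line : String) : String :=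
  (line.toList.foldl pvStepA (false, "")).2

-- ===== PORT B =====
-- the outer while loop of Source B: copy one char; after a ';', skip the whole run of ';'
def pvCollapseRuns : List Char → List Char
  | [] => []
  | c :: rest =>
    if c = ';' then c :: pvCollapseRuns (rest.dropWhile (· = ';'))
    else c :: pvCollapseRuns rest
termination_by l => l.length
decreasing_by
  · exact Nat.lt_succ_of_le (List.length_dropWhile_le _ _)
  · exact Nat.lt_succ_self _

def collapse_semicolons_alt (line : String) : String :=
  let s := String.ofList (pvCollapseRuns line.toList)   -- ''.join(out)
  if PySem.Str.startswith s ";" then PySem.Str.slice s (some 1) none else s   -- s[1:] if s.startswith(';') else s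

-- ===== PRECONDITION & SPEC =====
def Spec_collapse_semicolons (line : String) (out : String) : Prop := out = collapse_semicolons_alt line
instance (line : String) (out : String) : Decidable (Spec_collapse_semicolons line out) := by unfold Spec_collapse_semicolons; infer_instance

-- ===== CLAIM (what is proved, stated in full; the proofs are below) =====
def Claim_equal_collapse_semicolons : Prop := ∀ (line : String), Dom_collapse_semicolons line → Spec_collapse_semicolons line (collapse_semicolons line)

-- ===== LEMMAS AND PROOFS =====

-- functional characterisation of A's loop state machine
def pvG : Bool → List Char → List Char
  | _, [] => []
  | add, c :: cs =>
    if c = ';' then (if add then ';' :: pvG false cs else pvG false cs)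
    else c :: pvG true cs

theorem pvFoldl_eq_G (cs : List Char) : ∀ (add : Bool) (l : String),
    ((cs.foldl pvStepA (add, l)).2).toList = l.toList ++ pvG add cs := by
  induction cs with
  | nil => intro add l; simp [pvG]
  | cons c cs ih =>
    intro add l
    rw [List.foldl_cons]
    by_cases hc : c = ';'
    · subst hc
      cases add with
      | false =>
        have hstep : pvStepA (false, l) ';' = (false, l) := by simp [pvStepA]
        rw [hstep, ih]; simp [pvG]
      | true =>
        have hstep : pvStepA (true, l) ';' = (false, l.push ';') := by simp [pvStepA]
        rw [hstep, ih]; simp [pvG]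
    · have hstep : pvStepA (add, l) c = (true, l.push c) := by simp [pvStepA, hc]
      rw [hstep, ih]; simp [pvG, hc]

theorem pvG_false (cs : List Char) :
    pvG false cs = pvG true (cs.dropWhile (· = ';')) := by
  induction cs with
  | nil => simp [pvG]
  | cons c cs ih =>
    by_cases hc : c = ';'
    · simpa [pvG, hc] using ih
    · simp [pvG, hc, List.dropWhile]

theorem pvG_true (cs : List Char) : pvG true cs = pvCollapseRuns cs := by
  induction hn : cs.length using Nat.strong_induction_on generalizing cs with
  | _ n ih =>
    cases cs with
    | nil => simp [pvG, pvCollapseRuns]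
    | cons c cs =>
      by_cases hc : c = ';'
      · have hlen : (cs.dropWhile (· = ';')).length < n := by
          subst hn; exact Nat.lt_succ_of_le (List.length_dropWhile_le _ _)
        simp [pvG, pvCollapseRuns, hc, pvG_false, ih _ hlen _ rfl]
      · have hlen : cs.length < n := by subst hn; exact Nat.lt_succ_self _
        simp [pvG, pvCollapseRuns, hc, ih _ hlen _ rfl]

theorem pvB_toList (line : String) :
    (collapse_semicolons_alt line).toList
      = pvCollapseRuns (line.toList.dropWhile (· = ';')) := by
  unfold collapse_semicolons_alt
  cases hcs : line.toList with
  | nil =>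
    simp only [hcs, pvCollapseRuns, List.dropWhile]
    simp [PySem.Str.startswith, PySem.Chars.startswith]
  | cons c cs =>
    by_cases hc : c = ';'
    · simp [hcs, hc, pvCollapseRuns, PySem.Str.startswith, PySem.Chars.startswith,
        PySem.Str.slice, PySem.Chars.slice_eq_listSlice, PySem.List.slice_from_one,
        List.dropWhile]
    · have hc' : ¬ (';' = c) := fun h => hc h.symm
      simp [hcs, hc, hc', pvCollapseRuns, PySem.Str.startswith, PySem.Chars.startswith,
        List.dropWhile]

-- ===== VERDICT (by name: the statement is the Claim_ definition above) =====
theorem collapse_semicolons_spec : Claim_equal_collapse_semicolons := by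
  intro line _
  unfold Spec_collapse_semicolons
  apply String.toList_inj.mp
  rw [pvB_toList]
  have hA := pvFoldl_eq_G line.toList false ""
  unfold collapse_semicolons
  rw [hA]
  simp [pvG_false, pvG_true]
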